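-- pv_equiv track=rewrite | github.com/v-smith/PK_Units_Standard | pk_aug/augmentation.py | check_for_divide
-- ===== SOURCE A (Python) =====
-- def check_for_divide(inp_mention: str) -> str:
--     if len(inp_mention.split("/")) > 1:
--         # Checks for the first "/" and if more than one, conversts subsequent "/" to "·"
--         splt_on_divide = inp_mention.split("/", 1)
--         replaced_second_divide = [x.replace("/", "·") for x in splt_on_divide]
--         replaced_second_divide = ["(" + item + ")(-1)" for item in replaced_second_divide[1:]]
--         replaced_second_divide.insert(0, splt_on_divide[0])
--         new_inp_mention = "·".join(replaced_second_divide)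
--         return new_inp_mention.strip("·")
--
--     return inp_mention
-- ===== SOURCE B (Python) =====
-- def check_for_divide(inp_mention: str) -> str:
--     # Single left-to-right character scan: the first slash opens the inverted
--     # group, later slashes become the dot separator; close the group at the
--     # end and strip stray dots.
--     if '/' not in inp_mention:
--         return inp_mention
--     pieces = []
--     seen = False
--     for ch in inp_mention:
--         if ch == '/':
--             pieces.append('·' if seen else '·(')
--             seen = True
--         else:
--             pieces.append(ch)
--     return (''.join(pieces) + ')(-1)').strip('·')
-- ===== Notes on version B (the rewrite author's own statement) =====
-- stated objective: simpler
-- what changed: B replaces A's split-once / per-element replace / wrap / insert / join pipeline by a single left-to-right character scan that opens the inverted group at the first slash, turns later slashes into the dot separator, and appends the closing inverse suffix once at the end.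
import Mathlib
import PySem

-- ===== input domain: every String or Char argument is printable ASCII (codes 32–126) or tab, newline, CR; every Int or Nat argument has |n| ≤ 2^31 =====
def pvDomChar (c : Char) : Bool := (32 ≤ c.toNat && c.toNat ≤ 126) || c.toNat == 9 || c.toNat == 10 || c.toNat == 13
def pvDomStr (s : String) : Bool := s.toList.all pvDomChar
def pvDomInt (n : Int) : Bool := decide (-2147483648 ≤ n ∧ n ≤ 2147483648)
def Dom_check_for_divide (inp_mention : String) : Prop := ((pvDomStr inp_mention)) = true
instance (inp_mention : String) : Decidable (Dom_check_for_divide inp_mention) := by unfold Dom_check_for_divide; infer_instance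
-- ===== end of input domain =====

-- B replaces A's split-once / replace / wrap / insert / join pipeline by a single
-- left-to-right character scan emitting the rewritten text directly: simpler, same O(n) cost.


-- ===== PORT A =====
def check_for_divide (inp_mention : String) : String :=
  if ((PySem.Str.split? inp_mention "/").getD []).length > 1 then
    let splt_on_divide := (PySem.Str.splitMax? inp_mention "/" 1).getD []
    let replaced_second_divide := splt_on_divide.map (fun x => PySem.Str.replace x "/" "·")
    let replaced_second_divide' := (PySem.List.slice replaced_second_divide (some 1) none).map
        (fun item => "(" ++ item ++ ")(-1)")
    -- splt_on_divide[0]: split never returns an empty list, so the getD default never fires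
    let replaced_second_divide'' :=
      PySem.List.insert replaced_second_divide' 0 ((PySem.List.pyGet? splt_on_divide 0).getD "")
    let new_inp_mention := PySem.Str.join "·" replaced_second_divide''
    PySem.Str.stripChars new_inp_mention "·"
  else inp_mention

-- ===== PORT B =====
-- one step of Source B's loop: append "·" / "·(" / the character itself, and track the seen flag
def bStep (st : List Char × Bool) (ch : Char) : List Char × Bool :=
  if ch = '/' then (st.1 ++ (if st.2 then ['·'] else ['·', '(']), true)
  else (st.1 ++ [ch], st.2)

def check_for_divide_alt (inp_mention : String) : String :=
  if PySem.Str.isIn "/" inp_mention then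
    let st := inp_mention.toList.foldl bStep ([], false)
    PySem.Str.stripChars (String.ofList (st.1 ++ ")(-1)".toList)) "·"
  else inp_mention

-- ===== PRECONDITION & SPEC =====
def Spec_check_for_divide (inp_mention : String) (out : String) : Prop := out = check_for_divide_alt inp_mention
instance (inp_mention : String) (out : String) : Decidable (Spec_check_for_divide inp_mention out) := by unfold Spec_check_for_divide; infer_instance

-- ===== CLAIM (what is proved, stated in full; the proofs are below) =====
def Claim_equal_check_for_divide : Prop := ∀ (inp_mention : String), Dom_check_for_divide inp_mention → Spec_check_for_divide inp_mention (check_for_divide inp_mention)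

-- ===== LEMMAS AND PROOFS =====

def subSlash (c : Char) : Char := if c = '/' then '·' else c

def piecesSplit : List Char → List (List Char)
  | [] => [[]]
  | c :: t => if c = '/' then [] :: piecesSplit t else (piecesSplit t).modifyHead (c :: ·)

def onceSplit (pre : List Char) : List Char → List (List Char)
  | [] => [pre]
  | c :: t => if c = '/' then [pre, t] else onceSplit (pre ++ [c]) t

theorem piecesSplit_ne_nil (l : List Char) : piecesSplit l ≠ [] := by
  induction l with
  | nil => simp [piecesSplit]
  | cons c t ih =>
    simp only [piecesSplit]
    split_ifs
    · simp
    · cases ht : piecesSplit t with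
      | nil => exact absurd ht ih
      | cons p ps => simp

theorem piecesSplit_length_pos (l : List Char) : 0 < (piecesSplit l).length :=
  List.length_pos_iff.mpr (piecesSplit_ne_nil l)

theorem splitOn_go_single (fuel : Nat) : ∀ (l cur : List Char) (accs : List (List Char)),
    l.length ≤ fuel →
    PySem.Chars.splitOn.go ['/'] fuel l cur accs =
      accs.reverse ++ (piecesSplit l).modifyHead (cur.reverse ++ ·) := by
  induction fuel with
  | zero =>
    intro l cur accs h
    have : l = [] := by cases l <;> simp_all
    subst this
    rw [PySem.Chars.splitOn.go]
    simp [piecesSplit]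
  | succ n ih =>
    intro l cur accs h
    cases l with
    | nil =>
      rw [PySem.Chars.splitOn.go] <;> try omega
      simp [piecesSplit]
    | cons c t =>
      rw [PySem.Chars.splitOn.go] <;> try omega
      by_cases hc : c = '/'
      · subst hc
        rw [if_pos (by simp [List.isPrefixOf])]
        have hd : List.drop (['/'] : List Char).length ('/' :: t) = t := by simp
        rw [hd, ih t [] _ (by simp at h; omega)]
        simp only [piecesSplit, if_pos rfl]
        cases piecesSplit t <;> simp
      · rw [if_neg (by simp [List.isPrefixOf, beq_iff_eq]; exact fun e => hc e.symm)]
        rw [ih t (c :: cur) accs (by simp at h; omega)]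
        simp only [piecesSplit, if_neg hc]
        cases ht : piecesSplit t with
        | nil => exact absurd ht (piecesSplit_ne_nil t)
        | cons p ps => simp

theorem splitOn_single (cs : List Char) : PySem.Chars.splitOn cs ['/'] = piecesSplit cs := by
  unfold PySem.Chars.splitOn
  rw [splitOn_go_single (cs.length + 1) cs [] [] (by omega)]
  cases h : piecesSplit cs with
  | nil => exact absurd h (piecesSplit_ne_nil cs)
  | cons p ps => simp

theorem piecesSplit_length_gt (cs : List Char) : 1 < (piecesSplit cs).length ↔ '/' ∈ cs := by
  induction cs with
  | nil => simp [piecesSplit]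
  | cons c t ih =>
    simp only [piecesSplit]
    by_cases hc : c = '/'
    · subst hc
      rw [if_pos rfl]
      have := piecesSplit_length_pos t
      simp only [List.length_cons]
      constructor
      · intro _; exact List.mem_cons_self
      · intro _; omega
    · rw [if_neg hc]
      simp only [List.length_modifyHead, List.mem_cons]
      rw [ih]
      constructor
      · intro h; exact Or.inr h
      · rintro (h | h)
        · exact absurd h.symm hc
        · exact h

theorem splitOnMax_go_zero (fuel : Nat) (l cur : List Char) (accs : List (List Char)) :
    PySem.Chars.splitOnMax.go ['/'] fuel 0 l cur accs = accs.reverse ++ [cur.reverse ++ l] := by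
  cases fuel with
  | zero => rw [PySem.Chars.splitOnMax.go]; simp
  | succ n =>
    cases l with
    | nil =>
      rw [PySem.Chars.splitOnMax.go] <;> try omega
      simp
    | cons c t =>
      rw [PySem.Chars.splitOnMax.go] <;> try omega
      simp

theorem splitOnMax_go_one (fuel : Nat) : ∀ (l cur : List Char) (accs : List (List Char)),
    l.length ≤ fuel →
    PySem.Chars.splitOnMax.go ['/'] fuel 1 l cur accs = accs.reverse ++ onceSplit cur.reverse l := by
  induction fuel with
  | zero =>
    intro l cur accs h
    have : l = [] := by cases l <;> simp_all
    subst this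
    rw [PySem.Chars.splitOnMax.go]
    simp [onceSplit]
  | succ n ih =>
    intro l cur accs h
    cases l with
    | nil =>
      rw [PySem.Chars.splitOnMax.go] <;> try omega
      simp [onceSplit]
    | cons c t =>
      rw [PySem.Chars.splitOnMax.go] <;> try omega
      rw [if_neg (by omega)]
      by_cases hc : c = '/'
      · subst hc
        rw [if_pos (by simp [List.isPrefixOf])]
        have hd : List.drop (['/'] : List Char).length ('/' :: t) = t := by simp
        have h1 : (1 : Nat) - 1 = 0 := rfl
        rw [hd, h1, splitOnMax_go_zero]
        simp [onceSplit]
      · rw [if_neg (by simp [List.isPrefixOf, beq_iff_eq]; exact fun e => hc e.symm)]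
        rw [ih t (c :: cur) accs (by simp at h; omega)]
        simp [onceSplit, if_neg hc]

theorem splitOnMax_single (cs : List Char) :
    PySem.Chars.splitOnMax cs ['/'] 1 = onceSplit [] cs := by
  unfold PySem.Chars.splitOnMax
  rw [if_neg (by omega), show (1 : Int).toNat = 1 from rfl]
  rw [splitOnMax_go_one (cs.length + 1) cs [] [] (by omega)]
  simp

theorem onceSplit_no_slash {h : List Char} (hh : '/' ∉ h) (t : List Char) : ∀ pre,
    onceSplit pre (h ++ '/' :: t) = [pre ++ h, t] := by
  induction h with
  | nil => intro pre; simp [onceSplit]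
  | cons c cs ih =>
    intro pre
    have hc : c ≠ '/' := fun e => hh (e ▸ List.mem_cons_self)
    simp only [List.cons_append, onceSplit, if_neg hc]
    rw [ih (fun m => hh (List.mem_cons_of_mem _ m))]
    simp

theorem replace_go_single (fuel : Nat) : ∀ (l acc : List Char),
    l.length ≤ fuel →
    PySem.Chars.replace.go ['/'] ['·'] fuel l acc = acc.reverse ++ l.map subSlash := by
  induction fuel with
  | zero =>
    intro l acc h
    have : l = [] := by cases l <;> simp_all
    subst this
    rw [PySem.Chars.replace.go]
    simp
  | succ n ih =>
    intro l acc h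
    cases l with
    | nil =>
      rw [PySem.Chars.replace.go] <;> try omega
      simp
    | cons c t =>
      rw [PySem.Chars.replace.go] <;> try omega
      by_cases hc : c = '/'
      · subst hc
        rw [if_pos (by simp [List.isPrefixOf])]
        have hd : List.drop (['/'] : List Char).length ('/' :: t) = t := by simp
        rw [hd, ih t _ (by simp at h; omega)]
        simp [subSlash]
      · rw [if_neg (by simp [List.isPrefixOf, beq_iff_eq]; exact fun e => hc e.symm)]
        rw [ih t (c :: acc) (by simp at h; omega)]
        simp [subSlash, if_neg hc]

theorem replace_single (l : List Char) :
    PySem.Chars.replace l ['/'] ['·'] = l.map subSlash := by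
  unfold PySem.Chars.replace
  rw [if_neg (by simp)]
  rw [replace_go_single l.length l [] le_rfl]
  simp

theorem isIn_slash (s : List Char) : PySem.Chars.isIn ['/'] s = true ↔ '/' ∈ s := by
  rw [PySem.Chars.isIn_iff_infix]
  constructor
  · rintro ⟨a, b, rfl⟩; simp
  · intro hm
    obtain ⟨a, b, rfl⟩ := List.append_of_mem hm
    exact ⟨a, b, by simp⟩

theorem map_subSlash_id {l : List Char} (h : '/' ∉ l) : l.map subSlash = l := by
  conv_rhs => rw [← List.map_id l]
  refine List.map_congr_left (fun x hx => ?_)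
  have : x ≠ '/' := fun e => h (e ▸ hx)
  simp [subSlash, this]

theorem foldB_true (t : List Char) : ∀ acc,
    List.foldl bStep (acc, true) t = (acc ++ t.map subSlash, true) := by
  induction t with
  | nil => intro acc; simp
  | cons c cs ih =>
    intro acc
    rw [List.foldl_cons,
      show bStep (acc, true) c = (acc ++ (if c = '/' then ['·'] else [c]), true) from by
        by_cases hc : c = '/' <;> simp [bStep, hc]]
    by_cases hc : c = '/' <;> rw [ih] <;> simp [subSlash, hc]

theorem foldB_false {h : List Char} (hh : '/' ∉ h) : ∀ acc,
    List.foldl bStep (acc, false) h = (acc ++ h, false) := by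
  induction h with
  | nil => intro acc; simp
  | cons c cs ih =>
    intro acc
    have hc : c ≠ '/' := fun e => hh (e ▸ List.mem_cons_self)
    rw [List.foldl_cons, show bStep (acc, false) c = (acc ++ [c], false) from by simp [bStep, hc]]
    rw [ih (fun m => hh (List.mem_cons_of_mem _ m))]
    simp

theorem exists_slash_split {cs : List Char} (hm : '/' ∈ cs) :
    ∃ h t, '/' ∉ h ∧ cs = h ++ '/' :: t := by
  induction cs with
  | nil => cases hm
  | cons c rest ih =>
    by_cases hc : c = '/'
    · exact ⟨[], rest, by simp, by simp [hc]⟩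
    · have hm' : '/' ∈ rest := by
        rcases List.mem_cons.mp hm with e | m
        · exact absurd e.symm hc
        · exact m
      obtain ⟨h, t, hnh, rfl⟩ := ih hm'
      refine ⟨c :: h, t, ?_, rfl⟩
      simp only [List.mem_cons, not_or]
      exact ⟨fun e => hc e.symm, hnh⟩
theorem stripChars_congr {s s' : String} (chars : String) (h : s.toList = s'.toList) :
    PySem.Str.stripChars s chars = PySem.Str.stripChars s' chars := by
  unfold PySem.Str.stripChars
  rw [h]

theorem check_for_divide_spec : Claim_equal_check_for_divide := by
  unfold Claim_equal_check_for_divide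
  intro inp _
  unfold Spec_check_for_divide check_for_divide check_for_divide_alt
  dsimp only
  have hsl : ("/" : String).toList = ['/'] := by decide
  have hcd : ("·" : String).toList = ['·'] := by decide
  have hA : ((PySem.Str.split? inp "/").getD []).length =
      (piecesSplit inp.toList).length := by
    simp [PySem.Str.split?, PySem.Chars.split?, hsl, splitOn_single]
  by_cases hm : '/' ∈ inp.toList
  · rw [if_pos (by rw [hA]; exact (piecesSplit_length_gt _).mpr hm),
        if_pos (by unfold PySem.Str.isIn; rw [hsl]; exact (isIn_slash _).mpr hm)]
    obtain ⟨h, t, hnh, hdec⟩ := exists_slash_split hm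
    -- A side: evaluate the split(…, 1) pipeline
    have hsplt : (PySem.Str.splitMax? inp "/" 1).getD [] =
        [String.ofList h, String.ofList t] := by
      simp only [PySem.Str.splitMax?, hsl, PySem.Chars.splitMax?]
      rw [if_neg (by simp)]
      rw [hdec, splitOnMax_single, onceSplit_no_slash hnh t]
      simp
    rw [hsplt]
    have hrep : [String.ofList h, String.ofList t].map (fun x => PySem.Str.replace x "/" "·") =
        [String.ofList h, String.ofList (t.map subSlash)] := by
      simp only [List.map_cons, List.map_nil, PySem.Str.replace, hsl, hcd,
        String.toList_ofList, replace_single]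
      rw [map_subSlash_id hnh]
    rw [hrep]
    have hslice : PySem.List.slice
        [String.ofList h, String.ofList (t.map subSlash)] (some 1) none =
        [String.ofList (t.map subSlash)] := by
      simp [PySem.List.slice, PySem.List.clampIdx]
    rw [hslice]
    have hget : (PySem.List.pyGet? [String.ofList h, String.ofList t] 0).getD "" =
        String.ofList h := by
      simp [PySem.List.pyGet?, PySem.List.pyIdx?]
    rw [List.map_cons, List.map_nil, hget]
    have hins : PySem.List.insert
        [("(" : String) ++ String.ofList (t.map subSlash) ++ ")(-1)"] 0 (String.ofList h) =
        [String.ofList h, ("(" : String) ++ String.ofList (t.map subSlash) ++ ")(-1)"] := by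
      simp [PySem.List.insert, PySem.List.sliceIndices]
    rw [hins]
    -- B side: evaluate the fold
    have hfold : (inp.toList.foldl bStep ([], false)).1 =
        h ++ '·' :: '(' :: t.map subSlash := by
      rw [hdec, List.foldl_append, foldB_false hnh, List.foldl_cons,
        show bStep (([] : List Char) ++ h, false) '/' = (h ++ ['·', '('], true) from by
          simp [bStep], foldB_true]
      simp
    rw [hfold]
    -- both sides are stripChars of the same character list
    have h1 : ("(" : String).toList = ['('] := by decide
    have h2 : (")(-1)" : String).toList = [')', '(', '-', '1', ')'] := by decide
    apply stripChars_congr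
    simp [PySem.Str.join, PySem.Chars.join, List.intercalate, hcd, h1, h2]
  · rw [if_neg (by rw [hA]; intro hgt; exact hm ((piecesSplit_length_gt _).mp hgt)),
        if_neg (by unfold PySem.Str.isIn; rw [hsl]; intro hin
                   exact hm ((isIn_slash _).mp hin))]
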